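-- pv_equiv track=rewrite | github.com/daniel-reich/ubiquitous-fiesta | tfbKAYwHq2ot2FK3i_7.py | non_repeats
-- ===== SOURCE A (Python) =====
-- def non_repeats(base):
--     count = 0
--     for i in range(1, base+1):
--         current = base -1
--         for j in range(1,i):
--             current = current*(base - j)
--         count = count + current
--     return count
-- ===== SOURCE B (Python) =====
-- def non_repeats(base):
--     total = 0
--     term = base - 1
--     for i in range(1, base + 1):
--         total += term
--         term *= base - i
--     return total
-- ===== Notes on version B (the rewrite author's own statement) =====
-- stated objective: faster
-- what changed: Replaces the nested loop that recomputes each falling-factorial product from scratch with a single pass that maintains the running product incrementally.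
import Mathlib
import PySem

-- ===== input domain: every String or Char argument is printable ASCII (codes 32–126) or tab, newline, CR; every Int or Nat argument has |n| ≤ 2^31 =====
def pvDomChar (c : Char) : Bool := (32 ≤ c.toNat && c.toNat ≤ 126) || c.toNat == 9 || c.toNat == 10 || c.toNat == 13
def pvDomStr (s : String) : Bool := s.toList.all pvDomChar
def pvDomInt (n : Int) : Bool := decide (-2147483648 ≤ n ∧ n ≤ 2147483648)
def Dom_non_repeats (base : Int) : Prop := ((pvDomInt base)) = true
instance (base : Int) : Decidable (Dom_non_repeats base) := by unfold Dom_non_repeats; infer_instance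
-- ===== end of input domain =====

-- B replaces A's nested loop (each falling-factorial product recomputed from scratch)
-- with a single pass maintaining the running product: O(base) instead of O(base^2).

-- ===== PORT A =====
def non_repeats (base : Int) : Int :=
  (PySem.List.pyRange 1 (base + 1) 1).foldl
    (fun count i =>
      count + (PySem.List.pyRange 1 i 1).foldl (fun current j => current * (base - j)) (base - 1))
    0

-- ===== PORT B =====
def non_repeats_alt (base : Int) : Int :=
  ((PySem.List.pyRange 1 (base + 1) 1).foldl
    (fun (st : Int × Int) i => (st.1 + st.2, st.2 * (base - i)))
    (0, base - 1)).1

-- ===== PRECONDITION & SPEC =====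
def Spec_non_repeats (base : Int) (out : Int) : Prop := out = non_repeats_alt base
instance (base : Int) (out : Int) : Decidable (Spec_non_repeats base out) := by unfold Spec_non_repeats; infer_instance

-- ===== CLAIM (what is proved, stated in full; the proofs are below) =====
def Claim_equal_non_repeats : Prop := ∀ (base : Int), Dom_non_repeats base → Spec_non_repeats base (non_repeats base)

-- ===== LEMMAS AND PROOFS =====

-- A's inner-loop product for outer index i
def pvInner (base i : Int) : Int :=
  (PySem.List.pyRange 1 i 1).foldl (fun current j => current * (base - j)) (base - 1)

theorem pvInner_succ (base : Int) (m : Int) (hm : 1 ≤ m) :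
    pvInner base (m + 1) = pvInner base m * (base - m) := by
  unfold pvInner
  rw [PySem.List.pyRange_one_succ_right hm, List.foldl_append]
  simp

theorem pv_main (base : Int) (n : ℕ) :
    (PySem.List.pyRange 1 (1 + (n : Int)) 1).foldl
      (fun (st : Int × Int) i => (st.1 + st.2, st.2 * (base - i))) (0, base - 1)
    = ((PySem.List.pyRange 1 (1 + (n : Int)) 1).foldl
        (fun count i => count + pvInner base i) 0,
       pvInner base (1 + (n : Int))) := by
  induction n with
  | zero =>
      simp [PySem.List.pyRange_one_eq_nil (by norm_num : (1 : Int) ≤ 1), pvInner]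
  | succ k ih =>
      have hk : (1 : Int) ≤ 1 + (k : Int) := by omega
      have hr : PySem.List.pyRange 1 (1 + ((k : Int) + 1)) 1
          = PySem.List.pyRange 1 (1 + (k : Int)) 1 ++ [1 + (k : Int)] := by
        have := PySem.List.pyRange_one_succ_right (a := 1) (b := 1 + (k : Int)) hk
        rw [← this]; ring_nf
      push_cast
      rw [hr, List.foldl_append, List.foldl_append, ih]
      have h2 : (1 : Int) + (k : Int) + 1 = (1 + (k : Int)) + 1 := by ring
      have h3 : pvInner base (1 + ((k : Int) + 1)) = pvInner base (1 + (k : Int)) * (base - (1 + (k : Int))) := by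
        rw [show (1 : Int) + ((k : Int) + 1) = (1 + (k : Int)) + 1 by ring, pvInner_succ base (1 + (k : Int)) hk]
      simp [h3]

-- ===== VERDICT (by name: the statement is the Claim_ definition above) =====
theorem non_repeats_spec : Claim_equal_non_repeats := by
  intro base _
  unfold Spec_non_repeats non_repeats non_repeats_alt
  rcases (em (base ≤ 0)).imp id (fun h => lt_of_not_ge h) with hb | hb
  · rw [PySem.List.pyRange_one_eq_nil (by omega : base + 1 ≤ 1)]
    simp
  · have hn : base + 1 = 1 + ((base.toNat : Int)) := by omega
    rw [hn, pv_main]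
    simp [pvInner]
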